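-- pv_equiv track=rewrite | github.com/Bartol0220/Teoria-wspolbieznosci | lab5/thread_scheduling/src/relations.py | determine_relations
-- ===== SOURCE A (Python) =====
-- def is_dependency_relation(variable_a1, variables_a1, variable_a2, variables_a2):
--     """
--     Determines whether the relationship is a dependency.
--     """
--     if variable_a1 == variable_a2: # if both variables are the same
--         return True
--     if variable_a1 in variables_a2: # if one variable is used when calculating another
--         return True
--     if variable_a2 in variables_a1: # if one variable is used when calculating another
--         return True
--     return False
--
-- def add_to_relation(relation_dict, letter_a1, letter_a2):
--     if letter_a1 in relation_dict:
--         relation_dict[letter_a1].add(letter_a2)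
--     else:
--         relation_dict[letter_a1] = {letter_a2}
--
--     if letter_a2 in relation_dict:
--         relation_dict[letter_a2].add(letter_a1)
--     else:
--         relation_dict[letter_a2] = {letter_a1}
--
-- def determine_relations(actions_dict, letters):
--     """
--     Determines which relationships are dependent and which are independent.
--     """
--     dependency_relation = {}
--     independence_relation = {}
--
--     actions_list = list(actions_dict.items())
--
--     for i in range(len(actions_list)):
--         letter_a1, (variable_a1, variables_a1) = actions_list[i]
--         for j in range(i+1, len(actions_list)):
--             letter_a2, (variable_a2, variables_a2) = actions_list[j]
--             if is_dependency_relation(variable_a1, variables_a1, variable_a2, variables_a2):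
--                 add_to_relation(dependency_relation, letter_a1, letter_a2)
--             else: # if not dependency => independency
--                 add_to_relation(independence_relation, letter_a1, letter_a2)
--
--     for letter in letters: # adds I_sigma
--         add_to_relation(dependency_relation, letter, letter)
--
--     return dependency_relation, independence_relation
-- ===== SOURCE B (Python) =====
-- def determine_relations(actions_dict, letters):
--     """
--     Two-phase: build the dependency relation first (pairwise pass + self-loops),
--     then derive the independence relation as the complement of the dependency table.
--     """
--     dependency_relation = {}
--     items = list(actions_dict.items())
--     for i, (l1, (v1, vs1)) in enumerate(items):
--         for l2, (v2, vs2) in items[i + 1:]: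
--             if v1 == v2 or v1 in vs2 or v2 in vs1:
--                 dependency_relation.setdefault(l1, set()).add(l2)
--                 dependency_relation.setdefault(l2, set()).add(l1)
--     for letter in letters:
--         dependency_relation.setdefault(letter, set()).add(letter)
--
--     independence_relation = {}
--     for i, (l1, _) in enumerate(items):
--         for l2, _ in items[i + 1:]:
--             if l2 not in dependency_relation.get(l1, set()):
--                 independence_relation.setdefault(l1, set()).add(l2)
--                 independence_relation.setdefault(l2, set()).add(l1)
--     return dependency_relation, independence_relation
-- ===== Notes on version B (the rewrite author's own statement) =====
-- stated objective: alternative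
-- what changed: A classifies each i<j pair once, interleaving updates to both relation dicts in a single loop; B first builds only the dependency relation (pairwise pass plus self-loops) and then derives the independence relation in a separate complement pass that looks each pair up in the finished dependency table instead of re-classifying it.
import Mathlib
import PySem

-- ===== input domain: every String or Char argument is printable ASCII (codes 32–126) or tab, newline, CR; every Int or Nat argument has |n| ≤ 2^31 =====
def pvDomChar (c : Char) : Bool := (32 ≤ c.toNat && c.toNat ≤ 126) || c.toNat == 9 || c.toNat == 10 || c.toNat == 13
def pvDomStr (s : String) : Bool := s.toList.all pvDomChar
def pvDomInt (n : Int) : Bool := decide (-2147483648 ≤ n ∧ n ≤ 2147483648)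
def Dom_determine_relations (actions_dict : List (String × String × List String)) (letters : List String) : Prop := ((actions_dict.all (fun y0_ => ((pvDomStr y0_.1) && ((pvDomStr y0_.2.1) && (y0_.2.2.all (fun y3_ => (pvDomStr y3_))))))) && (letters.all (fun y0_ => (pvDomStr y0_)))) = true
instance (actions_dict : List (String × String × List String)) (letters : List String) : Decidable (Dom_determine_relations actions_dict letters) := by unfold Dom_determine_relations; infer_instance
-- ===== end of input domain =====

-- B replaces A's single interleaved classify-both-relations pair loop by a dependency-only pair
-- pass followed by a complement pass that derives the independence relation from the finished
-- dependency table (objective: alternative decomposition, same asymptotic cost).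
-- Both ports read the dict parameter `actions_dict` through PySem.Dict.ofList, exactly Python's
-- dict construction from those items (overwrite keeps position), so item keys are unique.

-- ===== PORT A =====
def is_dependency_relation (variable_a1 : String) (variables_a1 : List String)
    (variable_a2 : String) (variables_a2 : List String) : Bool :=
  if variable_a1 == variable_a2 then true
  else if variables_a2.contains variable_a1 then true
  else if variables_a1.contains variable_a2 then true
  else false

def add_to_relation (relation_dict : PySem.Dict String (List String))
    (letter_a1 letter_a2 : String) : PySem.Dict String (List String) :=
  let d1 := if relation_dict.contains letter_a1 then
      relation_dict.modify letter_a1 [] (fun s => PySem.Set.add s letter_a2)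
    else relation_dict.insert letter_a1 [letter_a2]
  if d1.contains letter_a2 then d1.modify letter_a2 [] (fun s => PySem.Set.add s letter_a1)
  else d1.insert letter_a2 [letter_a1]

-- A's inner `for j in range(i+1, len(actions_list))` loop: a fold over the items after position i
def pvAInner (a : String × String × List String) (rest : List (String × String × List String))
    (st : PySem.Dict String (List String) × PySem.Dict String (List String)) :
    PySem.Dict String (List String) × PySem.Dict String (List String) :=
  rest.foldl (fun st b =>
    if is_dependency_relation a.2.1 a.2.2 b.2.1 b.2.2 then (add_to_relation st.1 a.1 b.1, st.2)
    else (st.1, add_to_relation st.2 a.1 b.1)) st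

-- A's outer `for i in range(len(actions_list))` loop
def pvAPairs : List (String × String × List String) →
    PySem.Dict String (List String) × PySem.Dict String (List String) →
    PySem.Dict String (List String) × PySem.Dict String (List String)
  | [], st => st
  | a :: rest, st => pvAPairs rest (pvAInner a rest st)

def determine_relations (actions_dict : List (String × String × List String))
    (letters : List String) : (List (String × List String)) × (List (String × List String)) :=
  let actions_list := (PySem.Dict.ofList actions_dict).items
  let st := pvAPairs actions_list (PySem.Dict.empty, PySem.Dict.empty)
  let dependency_relation := letters.foldl (fun d letter => add_to_relation d letter letter) st.1
  (dependency_relation.items, st.2.items)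

-- ===== PORT B =====
-- `d.setdefault(l1, set()).add(l2)` mutates d[l1] = d.get(l1, set()) ∪ {l2} in place: Dict.modify
def pvBAdd (d : PySem.Dict String (List String)) (l1 l2 : String) :
    PySem.Dict String (List String) :=
  let d1 := d.modify l1 [] (fun s => PySem.Set.add s l2)
  d1.modify l2 [] (fun s => PySem.Set.add s l1)

-- B's first pass: record only the dependent pairs
def pvBDep : List (String × String × List String) → PySem.Dict String (List String) →
    PySem.Dict String (List String)
  | [], d => d
  | a :: rest, d => pvBDep rest (rest.foldl (fun d b =>
      if a.2.1 == b.2.1 || b.2.2.contains a.2.1 || a.2.2.contains b.2.1 then pvBAdd d a.1 b.1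
      else d) d)

-- B's complement pass: a pair is independent iff it is absent from the dependency table
def pvBIndep (dep : PySem.Dict String (List String)) :
    List (String × String × List String) → PySem.Dict String (List String) →
    PySem.Dict String (List String)
  | [], d => d
  | a :: rest, d => pvBIndep dep rest (rest.foldl (fun d b =>
      if !(dep.getD a.1 []).contains b.1 then pvBAdd d a.1 b.1 else d) d)

def determine_relations_alt (actions_dict : List (String × String × List String))
    (letters : List String) : (List (String × List String)) × (List (String × List String)) :=
  let items := (PySem.Dict.ofList actions_dict).items
  let dep0 := pvBDep items PySem.Dict.empty
  let dependency_relation := letters.foldl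
    (fun d letter => d.modify letter [] (fun s => PySem.Set.add s letter)) dep0
  let independence_relation := pvBIndep dependency_relation items PySem.Dict.empty
  (dependency_relation.items, independence_relation.items)

-- ===== PRECONDITION & SPEC =====
def Spec_determine_relations (actions_dict : List (String × String × List String)) (letters : List String) (out : (List (String × List String)) × (List (String × List String))) : Prop := out = determine_relations_alt actions_dict letters
instance (actions_dict : List (String × String × List String)) (letters : List String) (out : (List (String × List String)) × (List (String × List String))) : Decidable (Spec_determine_relations actions_dict letters out) := by unfold Spec_determine_relations; infer_instance

-- ===== CLAIM (what is proved, stated in full; the proofs are below) =====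
def Claim_equal_determine_relations : Prop := ∀ (actions_dict : List (String × String × List String)) (letters : List String), Dom_determine_relations actions_dict letters → Spec_determine_relations actions_dict letters (determine_relations actions_dict letters)

-- ===== LEMMAS AND PROOFS =====

def pvIsDep (a b : String × String × List String) : Bool :=
  is_dependency_relation a.2.1 a.2.2 b.2.1 b.2.2

def pvFoldAdd (P : List (String × String)) (d : PySem.Dict String (List String)) :
    PySem.Dict String (List String) :=
  P.foldl (fun d p => add_to_relation d p.1 p.2) d

-- generic shape of all three pair loops
def pvCondLoop (c : (String × String × List String) → (String × String × List String) → Bool) :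
    List (String × String × List String) → PySem.Dict String (List String) →
    PySem.Dict String (List String)
  | [], d => d
  | a :: rest, d =>
      pvCondLoop c rest (rest.foldl (fun d b => if c a b then add_to_relation d a.1 b.1 else d) d)

def pvPairs (c : (String × String × List String) → (String × String × List String) → Bool) :
    List (String × String × List String) → List (String × String)
  | [] => []
  | a :: rest => (rest.filter (c a)).map (fun b => (a.1, b.1)) ++ pvPairs c rest

theorem pvModifyEqInsert (d : PySem.Dict String (List String)) (k : String)
    (d0 : List String) (f : List String → List String) :
    d.modify k d0 f = d.insert k (f (d.getD k d0)) := by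
  rfl

theorem pvAddRelEq (d : PySem.Dict String (List String)) (a b : String) :
    add_to_relation d a b =
      (d.insert a (PySem.Set.add (d.getD a []) b)).insert b
        (PySem.Set.add ((d.insert a (PySem.Set.add (d.getD a []) b)).getD b []) a) := by
  have hadd : ∀ (x : String), PySem.Set.add ([] : List String) x = [x] := by
    intro x; simp [PySem.Set.add]
  simp only [add_to_relation]
  by_cases h : d.contains a = true
  · rw [if_pos h, pvModifyEqInsert]
    by_cases h2 : (d.insert a (PySem.Set.add (d.getD a []) b)).contains b = true
    · rw [if_pos h2, pvModifyEqInsert]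
    · rw [if_neg h2, PySem.Dict.getD_of_not_contains
        (d.insert a (PySem.Set.add (d.getD a []) b)) [] (by simpa using h2), hadd]
  · rw [if_neg h]
    have hg : d.getD a [] = [] := PySem.Dict.getD_of_not_contains d [] (by simpa using h)
    rw [hg, hadd]
    by_cases h2 : (d.insert a [b]).contains b = true
    · rw [if_pos h2, pvModifyEqInsert]
    · rw [if_neg h2, PySem.Dict.getD_of_not_contains (d.insert a [b]) []
        (by simpa using h2), hadd]

theorem pvBAddEq : pvBAdd = add_to_relation := by
  funext d a b
  rw [pvAddRelEq]
  unfold pvBAdd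
  rw [pvModifyEqInsert, pvModifyEqInsert]

theorem pvSelfAddEq (d : PySem.Dict String (List String)) (l : String) :
    d.modify l [] (fun s => PySem.Set.add s l) = add_to_relation d l l := by
  rw [pvAddRelEq, pvModifyEqInsert, PySem.Dict.getD_insert_self,
    PySem.Set.add_of_mem ((PySem.Set.mem_add _ _ _).mpr (Or.inr rfl)),
    PySem.Dict.insert_insert_self]

theorem pvMemAddRel (d : PySem.Dict String (List String)) (a b k x : String) :
    x ∈ (add_to_relation d a b).getD k [] ↔
      x ∈ d.getD k [] ∨ (k = a ∧ x = b) ∨ (k = b ∧ x = a) := by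
  rw [pvAddRelEq]
  simp only [PySem.Dict.getD_insert]
  split_ifs <;> simp_all [PySem.Set.mem_add]

theorem pvMemFoldAdd (P : List (String × String)) (d : PySem.Dict String (List String))
    (k x : String) :
    x ∈ (pvFoldAdd P d).getD k [] ↔ x ∈ d.getD k [] ∨ (k, x) ∈ P ∨ (x, k) ∈ P := by
  induction P generalizing d with
  | nil => simp [pvFoldAdd]
  | cons p P ih =>
    simp only [pvFoldAdd, List.foldl_cons] at ih ⊢
    rw [ih, pvMemAddRel]
    simp only [List.mem_cons, Prod.ext_iff]
    tauto

theorem pvAInnerSplit (a : String × String × List String)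
    (rest : List (String × String × List String))
    (dep indep : PySem.Dict String (List String)) :
    pvAInner a rest (dep, indep) =
      (rest.foldl (fun d b => if pvIsDep a b then add_to_relation d a.1 b.1 else d) dep,
       rest.foldl (fun d b => if !pvIsDep a b then add_to_relation d a.1 b.1 else d) indep) := by
  induction rest generalizing dep indep with
  | nil => rfl
  | cons b rest ih =>
    simp only [pvAInner, List.foldl_cons] at ih ⊢
    have e : is_dependency_relation a.2.1 a.2.2 b.2.1 b.2.2 = pvIsDep a b := rfl
    rw [e]
    cases h : pvIsDep a b
    · rw [if_neg (show ¬(false = true) by simp), if_neg (show ¬(false = true) by simp),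
        if_pos (show (!false) = true by simp)]
      exact ih _ _
    · rw [if_pos (show (true = true) from rfl), if_pos rfl,
        if_neg (show ¬((!true) = true) by simp)]
      exact ih _ _

theorem pvAPairsSplit (l : List (String × String × List String))
    (dep indep : PySem.Dict String (List String)) :
    pvAPairs l (dep, indep) =
      (pvCondLoop pvIsDep l dep, pvCondLoop (fun a b => !pvIsDep a b) l indep) := by
  induction l generalizing dep indep with
  | nil => rfl
  | cons a rest ih =>
    simp only [pvAPairs, pvCondLoop]
    rw [pvAInnerSplit, ih]

theorem pvIsDepOr (a b : String × String × List String) :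
    (a.2.1 == b.2.1 || b.2.2.contains a.2.1 || a.2.2.contains b.2.1) = pvIsDep a b := by
  cases h1 : a.2.1 == b.2.1 <;> cases h2 : b.2.2.contains a.2.1 <;>
    cases h3 : a.2.2.contains b.2.1 <;>
    simp only [pvIsDep, is_dependency_relation, h1, h2, h3] <;> simp

theorem pvBDepEq (l : List (String × String × List String))
    (d : PySem.Dict String (List String)) : pvBDep l d = pvCondLoop pvIsDep l d := by
  induction l generalizing d with
  | nil => rfl
  | cons a rest ih =>
    simp only [pvBDep, pvCondLoop, pvBAddEq]
    rw [show (fun (d : PySem.Dict String (List String)) b =>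
        if a.2.1 == b.2.1 || b.2.2.contains a.2.1 || a.2.2.contains b.2.1 then
          add_to_relation d a.1 b.1 else d) =
        (fun d b => if pvIsDep a b then add_to_relation d a.1 b.1 else d) from by
      funext d b; rw [pvIsDepOr]]
    exact ih _

theorem pvBIndepShape (dep : PySem.Dict String (List String))
    (l : List (String × String × List String)) (d : PySem.Dict String (List String)) :
    pvBIndep dep l d = pvCondLoop (fun a b => !(dep.getD a.1 []).contains b.1) l d := by
  induction l generalizing d with
  | nil => rfl
  | cons a rest ih =>
    simp only [pvBIndep, pvCondLoop, pvBAddEq]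
    exact ih _

theorem pvInnerFoldAdd
    (c : (String × String × List String) → (String × String × List String) → Bool)
    (a : String × String × List String) (rest : List (String × String × List String))
    (d : PySem.Dict String (List String)) :
    rest.foldl (fun d b => if c a b then add_to_relation d a.1 b.1 else d) d =
      pvFoldAdd ((rest.filter (c a)).map (fun b => (a.1, b.1))) d := by
  induction rest generalizing d with
  | nil => rfl
  | cons b rest ih =>
    simp only [List.foldl_cons, List.filter_cons]
    cases h : c a b
    · rw [if_neg (show ¬(false = true) by simp), if_neg (show ¬(false = true) by simp)]
      exact ih d
    · rw [if_pos (show (true = true) from rfl), if_pos rfl, List.map_cons]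
      have e : pvFoldAdd ((a.1, b.1) :: (rest.filter (c a)).map (fun b => (a.1, b.1))) d =
          pvFoldAdd ((rest.filter (c a)).map (fun b => (a.1, b.1)))
            (add_to_relation d a.1 b.1) := rfl
      rw [e]
      exact ih _

theorem pvCondLoopEqFoldAdd
    (c : (String × String × List String) → (String × String × List String) → Bool)
    (l : List (String × String × List String)) (d : PySem.Dict String (List String)) :
    pvCondLoop c l d = pvFoldAdd (pvPairs c l) d := by
  induction l generalizing d with
  | nil => rfl
  | cons a rest ih =>
    simp only [pvCondLoop, pvPairs]
    rw [pvInnerFoldAdd, ih]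
    simp [pvFoldAdd, List.foldl_append]

theorem pvCondLoopCongr
    (c₁ c₂ : (String × String × List String) → (String × String × List String) → Bool)
    (l : List (String × String × List String)) (d : PySem.Dict String (List String))
    (h : ∀ a m, (a :: m) <:+ l → ∀ b ∈ m, c₁ a b = c₂ a b) :
    pvCondLoop c₁ l d = pvCondLoop c₂ l d := by
  induction l generalizing d with
  | nil => rfl
  | cons a rest ih =>
    simp only [pvCondLoop]
    rw [PySem.List.foldl_congr_mem rest _ _ d
      (fun d' b hb => by rw [h a rest List.suffix_rfl b hb])]
    exact ih _ (fun a' m hs b hb => h a' m (hs.trans (List.suffix_cons a rest)) b hb)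

theorem pvSelfFold (letters : List String) (d : PySem.Dict String (List String)) :
    letters.foldl (fun d l => add_to_relation d l l) d =
      pvFoldAdd (letters.map (fun l => (l, l))) d := by
  simp [pvFoldAdd, List.foldl_map]

theorem pvPairsMemKeys
    (c : (String × String × List String) → (String × String × List String) → Bool)
    (l : List (String × String × List String)) (x y : String)
    (h : (x, y) ∈ pvPairs c l) : x ∈ l.map (·.1) ∧ y ∈ l.map (·.1) := by
  induction l with
  | nil => simp [pvPairs] at h
  | cons a rest ih =>
    simp only [pvPairs, List.mem_append, List.mem_map, List.mem_filter,
      Prod.mk.injEq] at h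
    simp only [List.map_cons, List.mem_cons]
    rcases h with ⟨b, ⟨hbr, _⟩, he1, he2⟩ | h
    · exact ⟨Or.inl he1.symm, Or.inr (List.mem_map.mpr ⟨b, hbr, he2⟩)⟩
    · have := ih h
      tauto

-- pair characterisation: for a before b in a unique-key list, an edge between their letters is
-- in the dependent-pairs list (in either orientation) exactly when the pair is dependent
theorem pvPairsChar : ∀ (l : List (String × String × List String)),
    (l.map (·.1)).Nodup → ∀ (a : String × String × List String)
    (m : List (String × String × List String)), (a :: m) <:+ l →
    ∀ b ∈ m,
    (((a.1, b.1) ∈ pvPairs pvIsDep l ∨ (b.1, a.1) ∈ pvPairs pvIsDep l) ↔ pvIsDep a b = true) := by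
  intro l
  induction l with
  | nil =>
    intro _ a m hsuf b _
    exact absurd (List.suffix_nil.mp hsuf) (by simp)
  | cons hd t ih =>
    intro hnd a m hsuf b hb
    simp only [List.map_cons, List.nodup_cons] at hnd
    obtain ⟨hhd, hnd'⟩ := hnd
    rcases List.suffix_cons_iff.mp hsuf with heq | hsuf'
    · injection heq with ha hm
      subst ha; subst hm
      simp only [pvPairs, List.mem_append]
      constructor
      · rintro ((h | h) | (h | h))
        · simp only [List.mem_map, List.mem_filter, Prod.mk.injEq] at h
          obtain ⟨b', ⟨hb't, hdep⟩, _, hs2⟩ := h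
          rw [← List.inj_on_of_nodup_map hnd' hb't hb hs2]
          exact hdep
        · exact absurd (pvPairsMemKeys _ _ _ _ h).1 hhd
        · simp only [List.mem_map, List.mem_filter, Prod.mk.injEq] at h
          obtain ⟨b', _, hs1, _⟩ := h
          exact absurd (hs1 ▸ List.mem_map_of_mem hb) hhd
        · exact absurd (pvPairsMemKeys _ _ _ _ h).2 hhd
      · intro h
        exact Or.inl (Or.inl (List.mem_map.mpr ⟨b, List.mem_filter.mpr ⟨hb, h⟩, rfl⟩))
    · have ha : a ∈ t := hsuf'.subset (by simp)
      have hbt : b ∈ t := hsuf'.subset (by simp [hb])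
      simp only [pvPairs, List.mem_append]
      have hXa : (a.1, b.1) ∉ (t.filter (pvIsDep hd)).map (fun x => (hd.1, x.1)) := by
        intro h
        simp only [List.mem_map, Prod.mk.injEq] at h
        obtain ⟨x, _, hx1, _⟩ := h
        exact hhd (hx1 ▸ List.mem_map_of_mem ha)
      have hXb : (b.1, a.1) ∉ (t.filter (pvIsDep hd)).map (fun x => (hd.1, x.1)) := by
        intro h
        simp only [List.mem_map, Prod.mk.injEq] at h
        obtain ⟨x, _, hx1, _⟩ := h
        exact hhd (hx1 ▸ List.mem_map_of_mem hbt)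
      constructor
      · rintro ((h | h) | (h | h))
        · exact absurd h hXa
        · exact (ih hnd' a m hsuf' b hb).mp (Or.inl h)
        · exact absurd h hXb
        · exact (ih hnd' a m hsuf' b hb).mp (Or.inr h)
      · intro h
        rcases (ih hnd' a m hsuf' b hb).mpr h with h' | h'
        · exact Or.inl (Or.inr h')
        · exact Or.inr (Or.inr h')

-- ===== VERDICT (by name: the statement is the Claim_ definition above) =====
theorem determine_relations_spec : Claim_equal_determine_relations := by
  unfold Claim_equal_determine_relations
  intro ad letters _
  unfold Spec_determine_relations
  simp only [determine_relations, determine_relations_alt]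
  have hnd : (((PySem.Dict.ofList ad).items).map (·.1)).Nodup := by
    have h := PySem.Dict.nodup_keys_ofList ad
    simpa [PySem.Dict.keys] using h
  have hselfFun : (fun (d : PySem.Dict String (List String)) letter =>
      d.modify letter [] (fun s => PySem.Set.add s letter)) =
      (fun (d : PySem.Dict String (List String)) letter =>
        add_to_relation d letter letter) := by
    funext d x; exact pvSelfAddEq d x
  rw [pvAPairsSplit]
  simp only [pvBDepEq, pvBIndepShape, hselfFun]
  have hcontains : ∀ (a : String × String × List String) m,
      (a :: m) <:+ (PySem.Dict.ofList ad).items → ∀ b ∈ m,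
      ((letters.foldl (fun d letter => add_to_relation d letter letter)
          (pvCondLoop pvIsDep (PySem.Dict.ofList ad).items PySem.Dict.empty)).getD a.1
          []).contains b.1 = pvIsDep a b := by
    intro a m hs b hb
    have hanb : a.1 ≠ b.1 := by
      have hsubnd : (((a :: m).map (·.1)) : List String).Nodup :=
        hnd.sublist ((hs.sublist).map (·.1))
      simp only [List.map_cons, List.nodup_cons] at hsubnd
      intro he
      apply hsubnd.1
      rw [he]
      exact List.mem_map_of_mem hb
    have hchar := pvPairsChar (PySem.Dict.ofList ad).items hnd a m hs b hb
    have hmem : b.1 ∈ ((letters.foldl (fun d letter => add_to_relation d letter letter)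
        (pvCondLoop pvIsDep (PySem.Dict.ofList ad).items PySem.Dict.empty)).getD a.1 [])
        ↔ pvIsDep a b = true := by
      rw [pvSelfFold, pvCondLoopEqFoldAdd, pvMemFoldAdd, pvMemFoldAdd]
      constructor
      · rintro ((h0 | hP) | hm1 | hm1)
        · rw [PySem.Dict.getD_empty] at h0
          cases h0
        · exact hchar.mp hP
        · obtain ⟨x, -, hx⟩ := List.mem_map.mp hm1
          rw [Prod.mk.injEq] at hx
          exact absurd (hx.1.symm.trans hx.2) hanb
        · obtain ⟨x, -, hx⟩ := List.mem_map.mp hm1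
          rw [Prod.mk.injEq] at hx
          exact absurd (hx.2.symm.trans hx.1) hanb
      · intro h
        exact Or.inl (Or.inr (hchar.mpr h))
    cases hpv : pvIsDep a b
    · rw [Bool.eq_false_iff]
      intro hc
      have := hmem.mp (List.contains_iff_mem.mp hc)
      rw [hpv] at this
      cases this
    · exact List.contains_iff_mem.mpr (hmem.mpr hpv)
  rw [pvCondLoopCongr
    (fun a b => !((letters.foldl (fun d letter => add_to_relation d letter letter)
      (pvCondLoop pvIsDep (PySem.Dict.ofList ad).items PySem.Dict.empty)).getD a.1
      []).contains b.1)
    (fun a b => !pvIsDep a b) (PySem.Dict.ofList ad).items PySem.Dict.empty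
    (fun a m hs b hb => congrArg (fun x => !x) (hcontains a m hs b hb))]
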